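-- pv_equiv track=rewrite | github.com/walshie4/Geeklets | TimeUntil.py | convertToTimeUnits
-- ===== SOURCE A (Python) =====
-- def convertToTimeUnits(secs):#returns a tuple in order (days, hours, mins, secs)
--     if secs > 86400: #at least one day
--         days = secs // 86400
--         leftover = secs % 86400
--         return tuple(map(sum, zip((days,0,0,0), convertToTimeUnits(leftover))))
--     elif secs > 3600: #more than an hour
--         hours = secs // 3600
--         leftover = secs % 3600
--         return tuple(map(sum, zip((0,hours,0,0), convertToTimeUnits(leftover))))
--     elif secs > 60: #more than a min
--         mins = secs // 60
--         seconds = secs % 60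
--         return (0,0,mins,seconds)
--     else: #less than a min
--         return (0,0,0,secs)
-- ===== SOURCE B (Python) =====
-- def convertToTimeUnits(secs):#returns a tuple in order (days, hours, mins, secs)
--     days = hours = mins = 0
--     if secs > 86400:
--         days = secs // 86400
--         secs %= 86400
--     if secs > 3600:
--         hours = secs // 3600
--         secs %= 3600
--     if secs > 60:
--         mins = secs // 60
--         secs %= 60
--     return (days, hours, mins, secs)
-- ===== Notes on version B (the rewrite author's own statement) =====
-- stated objective: simpler
-- what changed: Replaced the recursion with tuple(map(sum, zip(...))) recombination by a flat sequence of three independent if-guards over a running secs variable, keeping A's strict > thresholds.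
import Mathlib
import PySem

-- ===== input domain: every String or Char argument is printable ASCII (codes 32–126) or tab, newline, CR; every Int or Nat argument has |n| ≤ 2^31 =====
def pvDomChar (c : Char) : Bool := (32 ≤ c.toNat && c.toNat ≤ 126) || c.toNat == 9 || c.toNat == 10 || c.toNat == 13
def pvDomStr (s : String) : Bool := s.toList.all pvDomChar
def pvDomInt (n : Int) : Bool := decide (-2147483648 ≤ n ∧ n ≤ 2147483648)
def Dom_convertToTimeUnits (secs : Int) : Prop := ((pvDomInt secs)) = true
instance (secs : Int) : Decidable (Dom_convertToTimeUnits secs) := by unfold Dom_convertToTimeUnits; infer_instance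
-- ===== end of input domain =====

-- B replaces A's bounded recursion with a flat sequence of if-guards over a running seconds value, keeping A's strict > thresholds (objective: simpler).


-- ===== PORT A =====
-- literal transliteration of A: bounded recursion with componentwise tuple sums
def convertToTimeUnits (secs : Int) : Int × Int × Int × Int :=
  if secs > 86400 then
    let days := PySem.Int.floordiv secs 86400
    let leftover := PySem.Int.mod secs 86400
    let r := convertToTimeUnits leftover
    (days + r.1, 0 + r.2.1, 0 + r.2.2.1, 0 + r.2.2.2)
  else if secs > 3600 then
    let hours := PySem.Int.floordiv secs 3600
    let leftover := PySem.Int.mod secs 3600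
    let r := convertToTimeUnits leftover
    (0 + r.1, hours + r.2.1, 0 + r.2.2.1, 0 + r.2.2.2)
  else if secs > 60 then
    (0, 0, PySem.Int.floordiv secs 60, PySem.Int.mod secs 60)
  else (0, 0, 0, secs)
termination_by secs.toNat
decreasing_by
  · have h := PySem.Int.mod_eq_emod_of_pos (a := secs) (b := 86400) (by omega)
    omega
  · have h := PySem.Int.mod_eq_emod_of_pos (a := secs) (b := 3600) (by omega)
    omega

-- ===== PORT B =====
-- B: flat sequence of if-guards over a running seconds value (no recursion)
def convertToTimeUnits_alt (secs : Int) : Int × Int × Int × Int :=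
  let p1 := if secs > 86400 then (PySem.Int.floordiv secs 86400, PySem.Int.mod secs 86400) else ((0:Int), secs)
  let p2 := if p1.2 > 3600 then (PySem.Int.floordiv p1.2 3600, PySem.Int.mod p1.2 3600) else ((0:Int), p1.2)
  let p3 := if p2.2 > 60 then (PySem.Int.floordiv p2.2 60, PySem.Int.mod p2.2 60) else ((0:Int), p2.2)
  (p1.1, p2.1, p3.1, p3.2)

-- ===== PRECONDITION & SPEC =====
def Spec_convertToTimeUnits (secs : Int) (out : Int × Int × Int × Int) : Prop := out = convertToTimeUnits_alt secs
instance (secs : Int) (out : Int × Int × Int × Int) : Decidable (Spec_convertToTimeUnits secs out) := by unfold Spec_convertToTimeUnits; infer_instance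

-- ===== CLAIM (what is proved, stated in full; the proofs are below) =====
def Claim_equal_convertToTimeUnits : Prop := ∀ (secs : Int), Dom_convertToTimeUnits secs → Spec_convertToTimeUnits secs (convertToTimeUnits secs)

-- ===== LEMMAS AND PROOFS =====

-- ===== VERDICT (by name: the statement is the Claim_ definition above) =====
-- mod bounds for a positive divisor
theorem pymod_bounds (a b : Int) (hb : 0 < b) :
    0 ≤ PySem.Int.mod a b ∧ PySem.Int.mod a b < b := by
  rw [PySem.Int.mod_eq_emod_of_pos hb]
  exact ⟨Int.emod_nonneg a (by omega), Int.emod_lt_of_pos a hb⟩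

-- A = B on inputs at most a day (one recursion step at most)
theorem ab_eq_small (s : Int) (h : ¬ s > 86400) :
    convertToTimeUnits s = convertToTimeUnits_alt s := by
  rw [convertToTimeUnits, convertToTimeUnits_alt]
  by_cases h2 : s > 3600
  · have hb := pymod_bounds s 3600 (by omega)
    simp only [if_neg h, if_pos h2]
    rw [convertToTimeUnits]
    simp only [if_neg (show ¬ PySem.Int.mod s 3600 > 86400 by omega),
      if_neg (show ¬ PySem.Int.mod s 3600 > 3600 by omega)]
    split_ifs <;> simp
  · simp only [if_neg h, if_neg h2]
    split_ifs <;> simp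

-- key lemma: A = B everywhere (unconditionally)
theorem ab_eq (secs : Int) : convertToTimeUnits secs = convertToTimeUnits_alt secs := by
  by_cases h1 : secs > 86400
  · have hb := pymod_bounds secs 86400 (by omega)
    rw [convertToTimeUnits, convertToTimeUnits_alt]
    simp only [if_pos h1]
    rw [ab_eq_small (PySem.Int.mod secs 86400) (by omega), convertToTimeUnits_alt]
    simp only [if_neg (show ¬ PySem.Int.mod secs 86400 > 86400 by omega)]
    split_ifs <;> simp
  · exact ab_eq_small secs h1

theorem convertToTimeUnits_spec : Claim_equal_convertToTimeUnits := by
  intro secs _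
  unfold Spec_convertToTimeUnits
  exact ab_eq secs
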